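-- pv_equiv track=rewrite | github.com/NavarroCamilo/MatrizDeControl | control.py | extraer_fracciones
-- ===== SOURCE A (Python) =====
-- def extraer_fracciones(cadena):
--     simbolos = []
--     i = 0
--     while i < len(cadena):
--         if cadena[i].isalpha():
--             j = i + 1
--             while j < len(cadena) and cadena[j] != '+' and cadena[j] != '-':
--                 if cadena[j] == '/':
--                     j += 1
--                     simbolo = ''
--                     while j < len(cadena) and cadena[j] != '+' and cadena[j] != '-':
--                         simbolo += cadena[j]
--                         j += 1
--                     simbolos.append(simbolo)
--                 else:
--                     j += 1
--             i = j
--         else: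
--             i += 1
--     return simbolos
-- ===== SOURCE B (Python) =====
-- def extraer_fracciones(cadena):
--     # split into terms on '+'/'-' (keeping empty terms), then extract per term
--     terms = []
--     cur = ''
--     for ch in cadena:
--         if ch == '+' or ch == '-':
--             terms.append(cur)
--             cur = ''
--         else:
--             cur += ch
--     terms.append(cur)
--     out = []
--     for t in terms:
--         ai = next((k for k, c in enumerate(t) if c.isalpha()), None)
--         if ai is None:
--             continue
--         si = t.find('/', ai + 1)
--         if si != -1:
--             out.append(t[si + 1:])
--     return out
-- ===== Notes on version B (the rewrite author's own statement) =====
-- stated objective: alternative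
-- what changed: Replaced A's single nested index-walking while loops with a two-stage pass: split the string into terms on '+'/'-' (keeping empty terms), then for each term find the first alphabetic character and the first '/' after it and take the rest of the term.
import Mathlib
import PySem

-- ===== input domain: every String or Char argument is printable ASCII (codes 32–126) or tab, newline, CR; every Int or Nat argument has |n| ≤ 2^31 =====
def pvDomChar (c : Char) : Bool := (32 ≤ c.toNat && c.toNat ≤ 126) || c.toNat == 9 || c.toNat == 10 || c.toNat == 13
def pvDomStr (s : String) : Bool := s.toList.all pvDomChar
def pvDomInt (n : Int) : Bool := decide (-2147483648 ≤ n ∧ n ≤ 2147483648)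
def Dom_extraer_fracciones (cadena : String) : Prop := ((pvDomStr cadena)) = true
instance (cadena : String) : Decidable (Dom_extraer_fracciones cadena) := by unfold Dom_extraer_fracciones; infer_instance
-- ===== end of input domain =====

-- B splits the string into terms on '+'/'-' and extracts the suffix after the first '/'
-- that follows the first alphabetic character of each term; alternative decomposition, same cost.

-- ===== PORT A =====
-- '+'/'-' delimiter test used by both A's and B's loops
def pvDelim (c : Char) : Bool := c = '+' || c = '-'

-- A's nested while loops, as mutual structural recursion on the remaining characters:
-- pvALoop = the outer 'while i < len' scan, pvAInner = the inner 'while j < len and ...' scan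
-- after an alphabetic character; the innermost simbolo-collecting while is the
-- takeWhile/dropWhile pair (collect chars until '+'/'-', continue from there).
mutual
def pvALoop (xs : List Char) : List String :=
  match xs with
  | [] => []
  | c :: rest => if c.isAlpha then pvAInner rest else pvALoop rest
termination_by 2 * xs.length
decreasing_by all_goals simp_wf <;> omega
def pvAInner (xs : List Char) : List String :=
  match xs with
  | [] => []
  | c :: rest =>
    if pvDelim c then pvALoop (c :: rest)
    else if c = '/' then
      String.mk (rest.takeWhile (fun d => !pvDelim d)) ::
        pvALoop (rest.dropWhile (fun d => !pvDelim d))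
    else pvAInner rest
termination_by 2 * xs.length + 1
decreasing_by
  all_goals simp_wf
  all_goals try omega
  all_goals (have := List.length_dropWhile_le (fun d => !pvDelim d) rest; omega)
end

def extraer_fracciones (cadena : String) : List String := pvALoop cadena.toList

-- ===== PORT B =====
-- Source B's first loop: accumulate (terms, cur), splitting on '+'/'-'
def pvBStep (st : List (List Char) × List Char) (c : Char) : List (List Char) × List Char :=
  if pvDelim c then (st.1 ++ [st.2], []) else (st.1, st.2 ++ [c])

def pvBTerms (xs : List Char) : List (List Char) :=
  let st := xs.foldl pvBStep ([], [])
  st.1 ++ [st.2]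

-- Source B's per-term extraction: first alpha index, then first '/' after it
def pvBExtract (t : List Char) : Option (List Char) :=
  match t.findIdx? Char.isAlpha with
  | none => none
  | some ai =>
    match (t.drop (ai + 1)).findIdx? (fun c => c = '/') with
    | none => none
    | some k => some ((t.drop (ai + 1)).drop (k + 1))

def extraer_fracciones_alt (cadena : String) : List String :=
  ((pvBTerms cadena.toList).filterMap pvBExtract).map String.mk

-- ===== PRECONDITION & SPEC =====
def Spec_extraer_fracciones (cadena : String) (out : List String) : Prop := out = extraer_fracciones_alt cadena
instance (cadena : String) (out : List String) : Decidable (Spec_extraer_fracciones cadena out) := by unfold Spec_extraer_fracciones; infer_instance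

-- ===== CLAIM (what is proved, stated in full; the proofs are below) =====
def Claim_equal_extraer_fracciones : Prop := ∀ (cadena : String), Dom_extraer_fracciones cadena → Spec_extraer_fracciones cadena (extraer_fracciones cadena)

-- ===== LEMMAS AND PROOFS =====

-- recursive characterisation of B's split-into-terms loop
def pvRTerms : List Char → List (List Char)
  | [] => [[]]
  | c :: xs =>
    if pvDelim c then [] :: pvRTerms xs
    else
      match pvRTerms xs with
      | [] => [[]]
      | h :: t => (c :: h) :: t

def pvConsHead (cur : List Char) : List (List Char) → List (List Char)
  | [] => [cur]
  | h :: t => (cur ++ h) :: t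

lemma pvRTerms_ne_nil (xs : List Char) : pvRTerms xs ≠ [] := by
  cases xs with
  | nil => simp [pvRTerms]
  | cons c xs =>
    simp only [pvRTerms]
    split
    · simp
    · split <;> simp

lemma pvFoldl_split (xs : List Char) (ts : List (List Char)) (cur : List Char) :
    (xs.foldl pvBStep (ts, cur)).1 ++ [(xs.foldl pvBStep (ts, cur)).2]
      = ts ++ pvConsHead cur (pvRTerms xs) := by
  induction xs generalizing ts cur with
  | nil => simp [pvConsHead, pvRTerms]
  | cons c xs ih =>
    simp only [List.foldl_cons, pvBStep]
    by_cases hd : pvDelim c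
    · simp only [hd, if_pos rfl, ih]
      have hne := pvRTerms_ne_nil xs
      cases hR : pvRTerms xs with
      | nil => exact absurd hR hne
      | cons h t => simp [pvRTerms, hd, pvConsHead, hR]
    · simp only [hd, if_neg, ih]
      have hne := pvRTerms_ne_nil xs
      cases hR : pvRTerms xs with
      | nil => exact absurd hR hne
      | cons h t => simp [pvRTerms, hd, pvConsHead, hR]

lemma pvBTerms_eq_rTerms (xs : List Char) : pvBTerms xs = pvRTerms xs := by
  have h := pvFoldl_split xs [] []
  have hne := pvRTerms_ne_nil xs
  cases hR : pvRTerms xs with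
  | nil => exact absurd hR hne
  | cons h' t =>
    simpa [pvBTerms, pvConsHead, hR] using h

-- terms = takeWhile up to the first delimiter, then the terms of what follows it
lemma pvRTerms_eq (xs : List Char) :
    pvRTerms xs = (xs.takeWhile (fun d => !pvDelim d)) ::
      (match xs.dropWhile (fun d => !pvDelim d) with
       | [] => []
       | _ :: r' => pvRTerms r') := by
  induction xs with
  | nil => simp [pvRTerms]
  | cons c xs ih =>
    by_cases hd : pvDelim c
    · simp [pvRTerms, hd, List.takeWhile_cons, List.dropWhile_cons]
    · simp only [pvRTerms, hd, if_neg, List.takeWhile_cons, List.dropWhile_cons, ih]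
      simp [hd]

lemma pvDelim_not_alpha {c : Char} (h : pvDelim c = true) : c.isAlpha = false := by
  simp only [pvDelim, Bool.or_eq_true, decide_eq_true_eq] at h
  rcases h with rfl | rfl <;> decide

lemma pvAlpha_not_delim {c : Char} (h : c.isAlpha = true) : pvDelim c = false := by
  by_contra hne
  have := pvDelim_not_alpha (c := c) (by revert hne; cases pvDelim c <;> simp)
  simp [this] at h

lemma pvDropWhile_head {p : Char → Bool} {xs : List Char} {d : Char} {r : List Char}
    (h : xs.dropWhile p = d :: r) : p d = false := by
  induction xs with
  | nil => simp at h
  | cons c xs ih =>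
    rw [List.dropWhile_cons] at h
    by_cases hp : p c = true
    · rw [if_pos hp] at h; exact ih h
    · rw [if_neg hp] at h
      cases h
      simpa using hp

lemma pvALoop_nil : pvALoop [] = [] := by rw [pvALoop.eq_def]

lemma pvALoop_cons (c : Char) (rest : List Char) :
    pvALoop (c :: rest) = if c.isAlpha then pvAInner rest else pvALoop rest := by
  rw [pvALoop.eq_def]

lemma pvAInner_nil : pvAInner [] = [] := by rw [pvAInner.eq_def]

lemma pvAInner_cons (c : Char) (rest : List Char) :
    pvAInner (c :: rest) =
      if pvDelim c then pvALoop (c :: rest)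
      else if c = '/' then
        String.mk (rest.takeWhile (fun d => !pvDelim d)) ::
          pvALoop (rest.dropWhile (fun d => !pvDelim d))
      else pvAInner rest := by
  rw [pvAInner.eq_def]

-- bExtract ignores a non-alphabetic head character
lemma pvBExtract_cons_not_alpha {c : Char} (h : c.isAlpha = false) (t : List Char) :
    pvBExtract (c :: t) = pvBExtract t := by
  simp only [pvBExtract, List.findIdx?_cons, h, if_neg Bool.false_ne_true]
  cases hf : t.findIdx? Char.isAlpha with
  | none => simp
  | some ai => simp [List.drop_succ_cons]

-- bExtract on a term headed by an alphabetic character: first '/' in the tail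
lemma pvBExtract_cons_alpha {c : Char} (h : c.isAlpha = true) (t : List Char) :
    pvBExtract (c :: t) =
      match t.findIdx? (fun c => c = '/') with
      | none => none
      | some k => some (t.drop (k + 1)) := by
  simp [pvBExtract, List.findIdx?_cons, h]

-- the inner while loop over one term's tail
lemma pvAInner_eq (xs : List Char) :
    pvAInner xs =
      (match (xs.takeWhile (fun d => !pvDelim d)).findIdx? (fun c => c = '/') with
       | none => []
       | some k => [String.mk ((xs.takeWhile (fun d => !pvDelim d)).drop (k + 1))])
      ++ pvALoop (xs.dropWhile (fun d => !pvDelim d)) := by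
  induction xs with
  | nil => simp [pvAInner_nil, pvALoop_nil]
  | cons c xs ih =>
    by_cases hd : pvDelim c
    · rw [pvAInner_cons]
      simp [hd, List.takeWhile_cons, List.dropWhile_cons]
    · by_cases hs : c = '/'
      · subst hs
        rw [pvAInner_cons]
        have hd' : pvDelim '/' = false := by decide
        simp [hd', List.takeWhile_cons, List.dropWhile_cons, List.findIdx?_cons]
      · rw [pvAInner_cons]
        have hcd : (decide (c = '/')) = false := by simpa using hs
        have hndc : (!pvDelim c) = true := by simp [hd]
        rw [if_neg hd, if_neg hs, ih, List.takeWhile_cons, List.dropWhile_cons,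
            if_pos hndc, if_pos hndc, List.findIdx?_cons, hcd]
        simp only [Bool.false_eq_true, if_false]
        cases hf : (xs.takeWhile (fun d => !pvDelim d)).findIdx? (fun c => c = '/') with
        | none => simp [hf]
        | some k => simp [hf, List.drop_succ_cons]

def pvF (ll : List (List Char)) : List String := (ll.filterMap pvBExtract).map String.mk

lemma pvMain : ∀ (n : Nat) (xs : List Char), xs.length ≤ n → pvALoop xs = pvF (pvRTerms xs) := by
  intro n
  induction n with
  | zero =>
    intro xs h
    have : xs = [] := List.length_eq_zero_iff.mp (Nat.le_zero.mp h)
    subst this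
    simp [pvALoop_nil, pvRTerms, pvF, pvBExtract]
  | succ n ih =>
    intro xs h
    cases xs with
    | nil => simp [pvALoop_nil, pvRTerms, pvF, pvBExtract]
    | cons c r =>
      have hr : r.length ≤ n := by simpa using h
      by_cases ha : c.isAlpha
      · -- alphabetic head: one term starting at c
        have hd : pvDelim c = false := pvAlpha_not_delim ha
        rw [pvALoop_cons]
        simp only [ha, if_pos]
        rw [pvAInner_eq]
        have hRT : pvRTerms (c :: r) = (c :: r.takeWhile (fun d => !pvDelim d)) ::
            (match r.dropWhile (fun d => !pvDelim d) with
             | [] => []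
             | _ :: r' => pvRTerms r') := by
          rw [pvRTerms_eq (c :: r), List.takeWhile_cons, List.dropWhile_cons]
          simp [hd]
        rw [hRT]
        simp only [pvF, List.filterMap_cons]
        rw [pvBExtract_cons_alpha ha]
        cases hdr : r.dropWhile (fun d => !pvDelim d) with
        | nil =>
          simp only [pvALoop_nil]
          cases hf : (r.takeWhile (fun d => !pvDelim d)).findIdx? (fun c => c = '/') with
          | none => simp [hf, pvF]
          | some k => simp [hf, pvF]
        | cons d r' =>
          have hpd : (!pvDelim d) = false := pvDropWhile_head hdr
          have hdd : pvDelim d = true := by simpa using hpd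
          have hda : d.isAlpha = false := pvDelim_not_alpha hdd
          have hL : pvALoop (d :: r') = pvALoop r' := by
            rw [pvALoop_cons]; simp [hda]
          have hr' : r'.length ≤ n := by
            have h1 : (d :: r').length ≤ r.length := hdr ▸ List.length_dropWhile_le _ _
            simp only [List.length_cons] at h1
            omega
          rw [hL, ih r' hr']
          cases hf : (r.takeWhile (fun d => !pvDelim d)).findIdx? (fun c => c = '/') with
          | none => simp [hf, pvF]
          | some k => simp [hf, pvF]
      · -- non-alphabetic head: skipped by A, irrelevant to B's extraction
        rw [pvALoop_cons]
        simp only [ha, if_neg Bool.false_ne_true, ih r hr]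
        by_cases hd : pvDelim c
        · have hRT : pvRTerms (c :: r) = [] :: pvRTerms r := by simp [pvRTerms, hd]
          rw [hRT]
          simp [pvF, pvBExtract]
        · have hne := pvRTerms_ne_nil r
          cases hR : pvRTerms r with
          | nil => exact absurd hR hne
          | cons h' t =>
            have hRT : pvRTerms (c :: r) = (c :: h') :: t := by simp [pvRTerms, hd, hR]
            rw [hRT]
            have hca : c.isAlpha = false := by simpa using ha
            unfold pvF
            rw [List.filterMap_cons, List.filterMap_cons, pvBExtract_cons_not_alpha hca]

-- ===== VERDICT (by name: the statement is the Claim_ definition above) =====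
theorem extraer_fracciones_spec : Claim_equal_extraer_fracciones := by
  intro cadena _
  unfold Spec_extraer_fracciones extraer_fracciones extraer_fracciones_alt
  rw [pvBTerms_eq_rTerms, pvMain cadena.toList.length cadena.toList le_rfl]
  rfl
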